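-- pv_equiv track=rewrite | github.com/Magiczne/AdventOfCode2017 | 06/main.py | solve
-- ===== SOURCE A (Python) =====
-- def solve(banks):
--     history = []
--
--     while True:
--         if tuple(banks) in history:
--             return {
--                 'Part 1': len(history),
--                 'Part 2': len(history) - history.index(tuple(banks))
--             }
--
--         history.append(tuple(banks))
--
--         redistribution = max(banks)
--         r_idx = banks.index(redistribution)
--
--         banks[r_idx] = 0
--
--         while redistribution > 0:
--             r_idx += 1
--             banks[r_idx % len(banks)] += 1
--             redistribution -= 1
-- ===== SOURCE B (Python) =====
-- def solve(banks):
--     # Differs from A in side effects only: does not mutate the caller's list.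
--     n = len(banks)
--     seen = {}
--     state = tuple(banks)
--     step = 0
--     while state not in seen:
--         seen[state] = step
--         step += 1
--         m = max(state)
--         i = state.index(m)
--         if m > 0:
--             q, r = divmod(m, n)
--             state = tuple((0 if j == i else v) + q + (1 if (j - i - 1) % n < r else 0)
--                           for j, v in enumerate(state))
--         else:
--             state = tuple(0 if j == i else v for j, v in enumerate(state))
--     return {'Part 1': step, 'Part 2': step - seen[state]}
-- ===== Notes on version B (the rewrite author's own statement) =====
-- stated objective: alternative
-- what changed: Cycle detection via a dict state->step instead of a linear scan of the history list plus list.index, and redistribution done arithmetically with divmod in one pass over the banks instead of handing the blocks out one by one (measured ~4x at mid sizes, 1.47x at the largest size both finish, so not claimed as faster); B also does not mutate the input list.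
import Mathlib
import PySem

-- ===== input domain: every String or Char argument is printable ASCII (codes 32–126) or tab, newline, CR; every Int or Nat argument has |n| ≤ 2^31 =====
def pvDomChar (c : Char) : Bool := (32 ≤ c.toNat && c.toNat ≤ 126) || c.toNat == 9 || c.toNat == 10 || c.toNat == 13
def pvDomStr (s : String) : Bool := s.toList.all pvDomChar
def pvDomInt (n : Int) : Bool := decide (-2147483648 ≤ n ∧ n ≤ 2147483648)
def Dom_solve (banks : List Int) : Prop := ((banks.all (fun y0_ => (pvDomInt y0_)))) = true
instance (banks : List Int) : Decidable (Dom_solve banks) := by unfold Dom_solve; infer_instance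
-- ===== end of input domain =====

-- B replaces A's linear scan of the history by a dict keyed by the state and hands the blocks
-- out arithmetically with divmod in one pass instead of one by one; return-value equivalence
-- only: A mutates the caller's list in place, B does not.

-- ===== PORT A =====
-- fuel for the 'while True' loop (both ports use the same constant; the proof of equality
-- does not assume it is ever large enough — it equates the two loops step by step)
def pvFuel : Nat := 4611686018427387904

-- the inner 'while redistribution > 0' loop of A, one recursive call per unit handed out
def solveInnerA (fuel : Nat) (banks : List Int) (rIdx : Int) : List Int :=
  match fuel with
  | 0 => banks
  | f+1 =>
      let rIdx' := rIdx + 1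
      let k := PySem.Int.mod rIdx' (banks.length : Int)
      solveInnerA f (PySem.List.pySetD banks k (PySem.List.pyGetD banks k 0 + 1)) rIdx'

def solveLoopA (fuel : Nat) (banks : List Int) (history : List (List Int)) : List (String × Int) :=
  match fuel with
  | 0 => []
  | f+1 =>
    if history.contains banks then
      [("Part 1", (history.length : Int)),
       ("Part 2", (history.length : Int) - (((PySem.List.index? history banks).getD 0 : Nat) : Int))]
    else
      let history' := history ++ [banks]
      let red := (PySem.List.max? banks (fun y => y)).getD 0
      let rIdx := (PySem.List.index? banks red).getD 0
      let banks' := banks.set rIdx 0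
      let banks'' := solveInnerA red.toNat banks' (rIdx : Int)
      solveLoopA f banks'' history'

def solve (banks : List Int) : List (String × Int) := solveLoopA pvFuel banks []

-- ===== PORT B =====
-- one step of B: zero the fullest bank, then add q = m // n to every bank and one extra
-- block to each of the r = m % n banks that follow it (the comprehension in Source B)
def solveStepB (state : List Int) : List Int :=
  let n := (state.length : Int)
  let m := (PySem.List.max? state (fun y => y)).getD 0
  let i := ((PySem.List.index? state m).getD 0 : Nat)
  if m > 0 then
    let q := PySem.Int.floordiv m n
    let r := PySem.Int.mod m n
    (PySem.List.enumerate state 0).map (fun p =>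
      (if p.1 = (i : Int) then 0 else p.2) + q +
      (if PySem.Int.mod (p.1 - (i : Int) - 1) n < r then 1 else 0))
  else
    (PySem.List.enumerate state 0).map (fun p => if p.1 = (i : Int) then 0 else p.2)

def solveLoopB (fuel : Nat) (state : List Int) (seen : PySem.Dict (List Int) Int) (step : Int) :
    List (String × Int) :=
  match fuel with
  | 0 => []
  | f+1 =>
    if seen.contains state then
      [("Part 1", step), ("Part 2", step - seen.getD state 0)]
    else
      solveLoopB f (solveStepB state) (seen.insert state step) (step + 1)

def solve_alt (banks : List Int) : List (String × Int) :=
  solveLoopB pvFuel banks PySem.Dict.empty 0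

-- ===== PRECONDITION & SPEC =====
-- Pre_ excludes only the empty list, on which A raises ValueError (max of an empty sequence).
def Pre_solve (banks : List Int) : Prop := banks ≠ []
instance (banks : List Int) : Decidable (Pre_solve banks) := by unfold Pre_solve; infer_instance
def pvWitness_solve : List Int := [0, 2, 7, 0]

def Spec_solve (banks : List Int) (out : List (String × Int)) : Prop := out = solve_alt banks
instance (banks : List Int) (out : List (String × Int)) : Decidable (Spec_solve banks out) := by
  unfold Spec_solve; infer_instance

-- ===== CLAIM (what is proved, stated in full; the proofs are below) =====
def Claim_equal_solve : Prop :=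
  ∀ (banks : List Int), Dom_solve banks → Pre_solve banks → Spec_solve banks (solve banks)

-- ===== LEMMAS AND PROOFS =====

theorem pySetD_toNat (xs : List Int) (u : Int) (v : Int) (h0 : 0 ≤ u) (h : u < xs.length) :
    PySem.List.pySetD xs u v = xs.set u.toNat v := by
  have h2 : u.toNat < xs.length := by omega
  have hc := PySem.List.pySet?_natCast xs u.toNat v h2
  rw [show ((u.toNat : Nat) : Int) = u from by omega] at hc
  simp [PySem.List.pySetD, hc]

theorem pySetD_length (xs : List Int) (u : Int) (v : Int) :
    (PySem.List.pySetD xs u v).length = xs.length := by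
  simp only [PySem.List.pySetD, PySem.List.pySet?]
  cases h : PySem.List.pyIdx? xs.length u with
  | none => rfl
  | some k => simp

theorem innerA_length (fuel : Nat) : ∀ (cells : List Int) (t : Int),
    (solveInnerA fuel cells t).length = cells.length := by
  induction fuel with
  | zero => intro cells t; rfl
  | succ f ih => intro cells t; rw [solveInnerA, ih, pySetD_length]

-- A's inner loop adds, at each position k, the number of handed-out indices that land on k
theorem innerA_getD (fuel : Nat) : ∀ (cells : List Int) (t : Int), 0 < cells.length →
    ∀ k : Nat, k < cells.length →
    (solveInnerA fuel cells t).getD k 0 =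
      cells.getD k 0 +
        (((List.range fuel).countP
            (fun (j : Nat) => decide (PySem.Int.mod (t + 1 + (j : Int)) (cells.length : Int) = (k : Int)))
          : Nat) : Int) := by
  induction fuel with
  | zero => intro cells t hn k hk; simp [solveInnerA]
  | succ f ih =>
      intro cells t hn k hk
      rw [solveInnerA]
      set n := (cells.length : Int) with hndef
      have hmod0 : 0 ≤ PySem.Int.mod (t+1) n := PySem.Int.mod_nonneg _ (by omega)
      have hmodlt : PySem.Int.mod (t+1) n < n := PySem.Int.mod_lt _ (by omega)
      set u := PySem.Int.mod (t+1) n with hudef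
      have hset : PySem.List.pySetD cells u (PySem.List.pyGetD cells u 0 + 1)
          = cells.set u.toNat (cells.getD u.toNat 0 + 1) := by
        rw [PySem.List.pyGetD_of_nonneg cells 0 hmod0, pySetD_toNat _ _ _ hmod0 (by omega)]
      simp only [hset]
      have hlen : (cells.set u.toNat (cells.getD u.toNat 0 + 1)).length = cells.length := by simp
      rw [ih _ (t+1) (by omega) k (by omega)]
      rw [hlen]
      simp only [← hndef]
      have hval : (cells.set u.toNat (cells.getD u.toNat 0 + 1)).getD k 0
          = cells.getD k 0 + (if u = (k : Int) then 1 else 0) := by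
        by_cases hku : u.toNat = k
        · have hui : u = (k : Int) := by omega
          simp [List.getD, List.getElem?_set, hku, hk, hui]
        · have hui : ¬ (u = (k : Int)) := by omega
          simp [List.getD, List.getElem?_set, hku, hui]
      rw [hval]
      have hcount : (List.range (f+1)).countP
            (fun (j : Nat) => decide (PySem.Int.mod (t + 1 + (j : Int)) n = (k : Int)))
          = ((if u = (k : Int) then 1 else 0) +
            (List.range f).countP
              (fun (j : Nat) => decide (PySem.Int.mod (t + 1 + 1 + (j : Int)) n = (k : Int)))) := by
        rw [List.range_succ_eq_map, List.countP_cons, List.countP_map]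
        have hcg : (List.range f).countP
              ((fun (j : Nat) => decide (PySem.Int.mod (t + 1 + (j : Int)) n = (k : Int))) ∘ Nat.succ)
            = (List.range f).countP
              (fun (j : Nat) => decide (PySem.Int.mod (t + 1 + 1 + (j : Int)) n = (k : Int))) := by
          apply List.countP_congr
          intro j _
          simp only [Function.comp]
          congr 2
          push_cast
          ring
        rw [hcg]
        simp only [Nat.cast_zero, add_zero, ← hudef, decide_eq_true_eq]
        omega
      rw [hcount]
      push_cast
      split_ifs <;> omega

-- how many of the indices 0..mN-1 fall in residue class s mod n
theorem countRes (n s : Nat) (hn : 0 < n) (hs : s < n) : ∀ (mN : Nat),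
    (List.range mN).countP (fun j => decide (j % n = s)) =
      mN / n + (if s < mN % n then 1 else 0) := by
  intro mN
  induction mN with
  | zero => simp
  | succ m ih =>
      rw [List.range_succ, List.countP_append, ih]
      have hm := Nat.div_add_mod m n
      have hlt : m % n < n := Nat.mod_lt _ hn
      simp only [List.countP_cons, List.countP_nil, decide_eq_true_eq]
      by_cases hc : m % n + 1 = n
      · have hmul : n * (m / n + 1) = n * (m / n) + n := by ring
        have hm1 : m + 1 = n * (m / n + 1) := by omega
        have hdiv : (m + 1) / n = m / n + 1 := by
          rw [hm1, Nat.mul_div_cancel_left _ hn]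
        have hmod : (m + 1) % n = 0 := by rw [hm1]; exact Nat.mul_mod_right _ _
        rw [hdiv, hmod]
        split_ifs <;> omega
      · have hdm : ((m+1) / n = m / n ∧ (m+1) % n = m % n + 1) := by
          rw [Nat.div_mod_unique hn]; omega
        rw [hdm.1, hdm.2]
        split_ifs <;> omega

-- an index i+1+j of A's one-by-one loop lands on k iff j is in the residue class (k-i-1) mod n
theorem predBridge (n0 i k j : Nat) (hn : 0 < n0) (hk : k < n0) :
    (PySem.Int.mod ((i:Int) + 1 + (j:Int)) (n0:Int) = (k:Int))
      ↔ (j % n0 = (PySem.Int.mod ((k:Int) - (i:Int) - 1) (n0:Int)).toNat) := by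
  have hnz : (0:Int) < (n0:Int) := by exact_mod_cast hn
  rw [PySem.Int.mod_eq_emod_of_pos hnz, PySem.Int.mod_eq_emod_of_pos hnz]
  have hs0 : 0 ≤ ((k:Int) - i - 1) % n0 := Int.emod_nonneg _ (by omega)
  have hkk : (k:Int) % n0 = (k:Int) := Int.emod_eq_of_lt (by positivity) (by exact_mod_cast hk)
  have step1 : ((i:Int) + 1 + j) % n0 = (k:Int) ↔ ((i:Int)+1+j) % n0 = (k:Int) % n0 := by
    rw [hkk]
  have step2 : ((i:Int)+1+j) % n0 = (k:Int) % n0 ↔ ((j:Int)) % n0 = ((k:Int)-i-1) % n0 := by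
    rw [Int.emod_eq_emod_iff_emod_sub_eq_zero, Int.emod_eq_emod_iff_emod_sub_eq_zero,
      show ((i:Int) + 1 + j) - k = (j:Int) - ((k:Int)-i-1) by ring]
  have step3 : ((j:Int)) % n0 = ((k:Int)-i-1) % n0 ↔ j % n0 = (((k:Int)-i-1) % n0).toNat := by
    rw [show ((k:Int)-i-1) % n0 = (((((k:Int)-i-1) % n0).toNat : Nat) : Int) from by omega]
    rw [← Int.natCast_mod]
    constructor
    · exact_mod_cast fun h => h
    · intro h; exact_mod_cast h
  rw [step1, step2, step3]

theorem enumMap_getElem (xs : List Int) (f : Int × Int → Int) (k : Nat)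
    (hk : k < ((PySem.List.enumerate xs 0).map f).length) :
    ((PySem.List.enumerate xs 0).map f)[k] = f ((k : Int), xs[k]'(by
      simpa [PySem.List.length_enumerate] using hk)) := by
  simp only [PySem.List.enumerate_eq_zipIdx_map, List.map_map, List.getElem_map,
    List.getElem_zipIdx, Function.comp]
  norm_num

-- the heart of the equivalence: one iteration of A's redistribution = one step of B
theorem stepAB (xs : List Int) (hne : xs ≠ []) :
    solveInnerA ((PySem.List.max? xs (fun y => y)).getD 0).toNat
        (xs.set ((PySem.List.index? xs ((PySem.List.max? xs (fun y => y)).getD 0)).getD 0) 0)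
        (((PySem.List.index? xs ((PySem.List.max? xs (fun y => y)).getD 0)).getD 0 : Nat) : Int)
      = solveStepB xs := by
  have hn : 0 < xs.length := List.length_pos_iff.mpr hne
  obtain ⟨m, hm⟩ : ∃ m, PySem.List.max? xs (fun y => y) = some m := by
    cases h : PySem.List.max? xs (fun y => y) with
    | none => exact absurd ((PySem.List.max?_eq_none_iff _ _).mp h) hne
    | some m => exact ⟨m, rfl⟩
  have hmem : m ∈ xs := PySem.List.max?_mem hm
  obtain ⟨i, hi⟩ : ∃ i, PySem.List.index? xs m = some i := by
    cases h : PySem.List.index? xs m with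
    | none => exact absurd ((PySem.List.index?_eq_none_iff _ _).mp h) (by simpa using hmem)
    | some i => exact ⟨i, rfl⟩
  obtain ⟨hilen, hxi, -⟩ := PySem.List.getElem_of_index?_eq_some hi
  unfold solveStepB
  rw [hm]
  simp only [Option.getD_some]
  simp only [hi, Option.getD_some]
  by_cases hmpos : m > 0
  · rw [if_pos hmpos]
    apply List.ext_getElem
    · rw [innerA_length]
      simp [PySem.List.length_enumerate]
    · intro k hk1 hk2
      rw [enumMap_getElem]
      rw [← List.getD_eq_getElem _ 0 hk1]
      have hklen : k < xs.length := by
        simpa [PySem.List.length_enumerate] using hk2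
      rw [innerA_getD _ _ _ (by simpa using hn) k (by simpa using hklen)]
      have hset : (xs.set i 0).getD k 0 = (if (k:Int) = (i:Int) then 0 else xs[k]'hklen) := by
        by_cases hki : k = i
        · subst hki; simp [List.getD, List.getElem?_set_self, hklen]
        · have : ¬((k:Int) = (i:Int)) := by omega
          simp [List.getD, List.getElem?_set_ne, hki, this, hklen,
            List.getElem?_eq_getElem hklen, Ne.symm hki]
      set n0 := xs.length with hn0
      have hnz : (0:Int) < (n0:Int) := by exact_mod_cast hn
      set s' := PySem.Int.mod ((k:Int) - (i:Int) - 1) (n0:Int) with hs'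
      have hs0 : 0 ≤ s' := PySem.Int.mod_nonneg _ hnz
      have hslt : s' < n0 := PySem.Int.mod_lt _ hnz
      have hcong : (List.range m.toNat).countP
            (fun (j : Nat) => decide (PySem.Int.mod (((i:Nat):Int) + 1 + (j : Int)) ((xs.set i 0).length : Int) = (k : Int)))
          = (List.range m.toNat).countP (fun j => decide (j % n0 = s'.toNat)) := by
        apply List.countP_congr
        intro j _
        simp only [List.length_set, ← hn0, decide_eq_true_eq]
        exact predBridge n0 i k j hn hklen
      rw [hcong, countRes n0 s'.toNat hn (by omega)]
      have hmn : m = ((m.toNat : Nat) : Int) := by omega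
      have hq : PySem.Int.floordiv m (n0:Int) = ((m.toNat / n0 : Nat) : Int) := by
        rw [hmn]; exact_mod_cast PySem.Int.floordiv_natCast m.toNat n0
      have hr : PySem.Int.mod m (n0:Int) = ((m.toNat % n0 : Nat) : Int) := by
        rw [hmn]; exact_mod_cast PySem.Int.mod_natCast m.toNat n0
      rw [hset]
      simp only [← hn0]
      simp only [hq, hr, ← hs']
      have hcast : ((m.toNat / n0 + if s'.toNat < m.toNat % n0 then 1 else 0 : Nat) : Int)
          = ((m.toNat / n0 : Nat) : Int) + (if s' < ((m.toNat % n0 : Nat) : Int) then 1 else 0) := by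
        rw [Nat.cast_add]
        congr 1
        split_ifs <;> omega
      rw [hcast]
      ring
  · rw [if_neg hmpos]
    have hm0 : m.toNat = 0 := by omega
    rw [hm0]
    apply List.ext_getElem
    · rw [show solveInnerA 0 (xs.set i 0) ((i:Nat):Int) = xs.set i 0 from rfl]
      simp [PySem.List.length_enumerate]
    · intro k hk1 hk2
      rw [enumMap_getElem]
      simp only [solveInnerA] at hk1 ⊢
      have hklen : k < xs.length := by simpa using hk1
      by_cases hki : k = i
      · subst hki
        simp [List.getElem_set_self, hklen]
      · have : ¬((k:Int) = (i:Int)) := by omega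
        simp [List.getElem_set_ne, Ne.symm hki, this, hki]

theorem stepB_length (xs : List Int) : (solveStepB xs).length = xs.length := by
  dsimp only [solveStepB]
  split <;> simp [PySem.List.length_enumerate]

-- the outer loops agree step by step: the dict is exactly 'state -> first index in history'
theorem loop_eq (fuel : Nat) : ∀ (banks : List Int) (history : List (List Int))
    (seen : PySem.Dict (List Int) Int) (step : Int),
    banks ≠ [] →
    step = (history.length : Int) →
    (∀ s, seen.get? s = Option.map (fun (k : Nat) => (k : Int)) (PySem.List.index? history s)) →
    solveLoopA fuel banks history = solveLoopB fuel banks seen step := by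
  induction fuel with
  | zero => intro banks history seen step _ _ _; rfl
  | succ f ih =>
      intro banks history seen step hne hstep hseen
      have hc : history.contains banks = seen.contains banks := by
        rw [PySem.Dict.contains_eq_isSome_get?, hseen banks]
        cases h : PySem.List.index? history banks with
        | none =>
            have hnm : banks ∉ history := (PySem.List.index?_eq_none_iff _ _).mp h
            simp [hnm]
        | some k =>
            have hmm : banks ∈ history :=
              (PySem.List.index?_isSome_iff history banks).mp (by rw [h]; rfl)
            simp [hmm]
      rw [solveLoopA, solveLoopB, hc]
      by_cases hcon : seen.contains banks = true
      · rw [if_pos hcon, if_pos hcon]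
        have hmem : banks ∈ history := by
          have := hc; rw [hcon] at this
          simpa using this
        obtain ⟨k, hk⟩ : ∃ k, PySem.List.index? history banks = some k := by
          cases h : PySem.List.index? history banks with
          | none => exact absurd ((PySem.List.index?_eq_none_iff _ _).mp h) (by simpa using hmem)
          | some k => exact ⟨k, rfl⟩
        have hgetD : seen.getD banks 0 = (k : Int) := by
          rw [PySem.Dict.getD_eq_get?_getD, hseen, hk]; rfl
        rw [hgetD, hk, hstep]
        rfl
      · rw [if_neg hcon, if_neg hcon]
        simp only []
        rw [stepAB banks hne]
        apply ih
        · intro h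
          have := stepB_length banks
          rw [h] at this
          exact hne (List.eq_nil_of_length_eq_zero (by simpa using this.symm))
        · simp [hstep]
        · intro s
          by_cases hs : s = banks
          · subst hs
            rw [PySem.Dict.get?_insert, if_pos rfl]
            have hnone : PySem.List.index? history s = none :=
              (PySem.List.index?_eq_none_iff _ _).mpr (by
                intro hmem
                rw [hc] at *
                have := (PySem.List.index?_isSome_iff history s).mpr hmem
                rw [PySem.Dict.contains_eq_isSome_get?, hseen, Option.isSome_map] at hcon
                exact hcon this)
            rw [PySem.List.index?_append_singleton_self history s
              ((PySem.List.index?_eq_none_iff _ _).mp hnone)]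
            simp [hstep]
          · rw [PySem.Dict.get?_insert, if_neg hs, hseen]
            by_cases hmem : s ∈ history
            · rw [PySem.List.index?_append_of_mem _ hmem]
            · have h1 : PySem.List.index? history s = none :=
                (PySem.List.index?_eq_none_iff _ _).mpr hmem
              have h2 : PySem.List.index? (history ++ [banks]) s = none :=
                (PySem.List.index?_eq_none_iff _ _).mpr (by
                  simp [hmem, hs])
              rw [h1, h2]

-- ===== VERDICT (by name: the statement is the Claim_ definition above) =====
theorem solve_spec : Claim_equal_solve := by
  intro banks _ hpre
  unfold Spec_solve solve solve_alt
  exact loop_eq pvFuel banks [] PySem.Dict.empty 0 hpre rfl (by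
    intro s; simp [PySem.Dict.get?_empty, PySem.List.index?_eq_idxOf?])
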